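-- pv_equiv track=rewrite | github.com/pypi-data/pypi-mirror-392 | packages/claia/claia-0.1.8.tar.gz/claia-0.1.8/src/claia/cli/commands/core.py | _split_cli_commands
-- ===== SOURCE A (Python) =====
-- from typing import Dict, Any, List, Optional, Tuple, Type
--
-- def _split_cli_commands(tokens: List[str]) -> List[List[str]]:
--   """
--   Split CLI tokens into separate command groups based on dash prefixes.
--
--   A token starting with '-' or '--' indicates the start of a new command.
--   All tokens following it (until the next dash-prefixed token) are arguments.
--
--   Args:
--       tokens: List of all tokens from the command line
--
--   Returns:
--       List of command groups, where each group is [command, arg1, arg2, ...]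
--
--   Example:
--       ['--set', 'model', 'gpt-4', '--query', 'What is AI?']
--       -> [['--set', 'model', 'gpt-4'], ['--query', 'What is AI?']]
--   """
--   if not tokens:
--     return []
--
--   command_groups = []
--   current_group = []
--
--   for token in tokens:
--     # Check if this token starts a new command (starts with dash)
--     if token.startswith('-') and current_group:
--       # Save the previous command group
--       command_groups.append(current_group)
--       current_group = [token]
--     else:
--       # Add to current group
--       current_group.append(token)
--
--   # Don't forget the last group
--   if current_group:
--     command_groups.append(current_group)
--
--   return command_groups
-- ===== SOURCE B (Python) =====
-- def _split_cli_commands(tokens):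
--   """Recursive decomposition: each group is the head token plus the maximal
--   run of following non-dash tokens; recurse on the remainder."""
--   if not tokens:
--     return []
--   head, rest = tokens[0], tokens[1:]
--   i = 0
--   while i < len(rest) and not rest[i].startswith('-'):
--     i += 1
--   return [[head] + rest[:i]] + _split_cli_commands(rest[i:])
-- ===== Notes on version B (the rewrite author's own statement) =====
-- stated objective: alternative
-- what changed: replaces the single accumulator loop (groups list + current group, flushed at the end) with structural recursion: take the head token plus the maximal run of following non-dash tokens as one group, then recurse on the remainder
import Mathlib
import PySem

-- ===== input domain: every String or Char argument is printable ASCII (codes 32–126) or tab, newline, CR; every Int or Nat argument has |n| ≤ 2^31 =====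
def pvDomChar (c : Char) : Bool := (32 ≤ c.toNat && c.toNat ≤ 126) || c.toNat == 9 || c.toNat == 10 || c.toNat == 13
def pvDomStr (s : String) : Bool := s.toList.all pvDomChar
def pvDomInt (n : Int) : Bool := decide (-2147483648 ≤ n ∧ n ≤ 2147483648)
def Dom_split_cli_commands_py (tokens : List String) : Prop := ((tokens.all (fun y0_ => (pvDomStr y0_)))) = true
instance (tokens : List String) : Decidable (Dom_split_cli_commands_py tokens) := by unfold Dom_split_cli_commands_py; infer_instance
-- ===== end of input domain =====

-- B replaces A's accumulator loop with structural recursion on the token list (same cost, different decomposition).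


-- ===== PORT A =====
-- one loop step: "if token.startswith('-') and current_group: flush current group; else: append token"
def pvStepA (s : List (List String) × List String) (token : String) :
    List (List String) × List String :=
  if PySem.Str.startswith token "-" && !s.2.isEmpty then (s.1 ++ [s.2], [token])
  else (s.1, s.2 ++ [token])

def split_cli_commands_py (tokens : List String) : List (List String) :=
  if tokens.isEmpty then []
  else
    let p := tokens.foldl pvStepA ([], [])
    -- "Don't forget the last group"
    if p.2.isEmpty then p.1 else p.1 ++ [p.2]

-- ===== PORT B =====
-- B's while loop computes i = length of the maximal run of non-dash tokens at the
-- front of rest, so rest[:i] is takeWhile of that predicate and rest[i:] is dropWhile.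
def pvND (t : String) : Bool := !PySem.Str.startswith t "-"

def split_cli_commands_py_alt : List String → List (List String)
  | [] => []
  | head :: rest =>
    (head :: rest.takeWhile pvND) :: split_cli_commands_py_alt (rest.dropWhile pvND)
  termination_by ts => ts.length
  decreasing_by
    have := List.length_dropWhile_le pvND rest
    simp only [List.length_cons]; omega

-- ===== PRECONDITION & SPEC =====
def Spec_split_cli_commands_py (tokens : List String) (out : List (List String)) : Prop := out = split_cli_commands_py_alt tokens
instance (tokens : List String) (out : List (List String)) : Decidable (Spec_split_cli_commands_py tokens out) := by unfold Spec_split_cli_commands_py; infer_instance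

-- ===== CLAIM (what is proved, stated in full; the proofs are below) =====
def Claim_equal_split_cli_commands_py : Prop := ∀ (tokens : List String), Dom_split_cli_commands_py tokens → Spec_split_cli_commands_py tokens (split_cli_commands_py tokens)

-- ===== LEMMAS AND PROOFS =====

theorem pvAlt_nil : split_cli_commands_py_alt [] = [] := by
  unfold split_cli_commands_py_alt
  rfl

theorem pvAlt_cons (t : String) (ts : List String) :
    split_cli_commands_py_alt (t :: ts) =
      (t :: ts.takeWhile pvND) :: split_cli_commands_py_alt (ts.dropWhile pvND) := by
  conv_lhs => unfold split_cli_commands_py_alt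

-- Loop invariant for A's fold: with a nonempty current group, finalizing the fold
-- yields the finished groups, then the current group extended by the coming run of
-- non-dash tokens, then B's recursion on the remainder.
theorem pvFoldA_char (ts : List String) :
    ∀ (acc : List (List String)) (cur : List String), cur ≠ [] →
      (let p := ts.foldl pvStepA (acc, cur);
       if p.2.isEmpty then p.1 else p.1 ++ [p.2]) =
      acc ++ (cur ++ ts.takeWhile pvND) ::
        split_cli_commands_py_alt (ts.dropWhile pvND) := by
  induction ts with
  | nil =>
    intro acc cur hcur
    simp [hcur, pvAlt_nil]
  | cons t ts ih =>
    intro acc cur hcur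
    have hne : cur.isEmpty = false := by simp [hcur]
    by_cases hd : PySem.Str.startswith t "-"
    · have hpt : pvND t = false := by simp only [pvND, hd, Bool.not_true]
      have hstep : pvStepA (acc, cur) t = (acc ++ [cur], [t]) := by
        unfold pvStepA; rw [hd, hne]; rfl
      simp only [List.foldl_cons, hstep]
      rw [ih (acc ++ [cur]) [t] (by simp)]
      simp [hpt, pvAlt_cons]
    · have hpt : pvND t = true := by simp only [pvND, eq_false_of_ne_true hd, Bool.not_false]
      have hstep : pvStepA (acc, cur) t = (acc, cur ++ [t]) := by
        unfold pvStepA; rw [eq_false_of_ne_true hd]; rfl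
      simp only [List.foldl_cons, hstep]
      rw [ih acc (cur ++ [t]) (by simp)]
      simp [hpt]

-- ===== VERDICT (by name: the statement is the Claim_ definition above) =====
theorem split_cli_commands_py_spec : Claim_equal_split_cli_commands_py := by
  intro tokens _
  unfold Spec_split_cli_commands_py split_cli_commands_py
  cases tokens with
  | nil => simp [pvAlt_nil]
  | cons t ts =>
    have hfirst : pvStepA ([], []) t = ([], [t]) := by
      unfold pvStepA; simp
    simp only [List.isEmpty_cons, Bool.false_eq_true, if_false, List.foldl_cons, hfirst]
    rw [pvFoldA_char ts [] [t] (by simp)]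
    rw [pvAlt_cons]
    simp
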